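-- pv_equiv track=rewrite | github.com/Eloyye/leetcode | python/arrays/delete_unique.py | delete_m
-- ===== SOURCE A (Python) =====
-- from collections import Counter
-- from typing import List
--
-- def delete_m(ids: List[int], m : int):
--     count = Counter(ids)
--     freq = sorted(count.values())
--     deletions = 0
--     for i in range(len(freq)):
--         if deletions >= m:
--             break
--         while deletions < m and freq[i] > 0:
--             freq[i] -= 1
--             deletions += 1
--     return sum(1 for f in freq if f > 0)
-- ===== SOURCE B (Python) =====
-- from collections import Counter
--
-- def delete_m(ids, m):
--     count = Counter(ids)
--     buckets = Counter(count.values())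
--     remaining = len(count)
--     budget = max(m, 0)
--     for v in sorted(buckets):
--         g = buckets[v]
--         full = min(g, budget // v)
--         remaining -= full
--         budget -= full * v
--         if full < g:
--             break
--     return remaining
-- ===== Notes on version B (the rewrite author's own statement) =====
-- stated objective: alternative
-- what changed: Replaces A's per-id unit-decrement loop over the sorted frequency list by a single bucketed pass: count ids, bucket distinct ids by frequency, then walk the distinct frequency values in ascending order deleting whole groups with integer division of the remaining budget.
import Mathlib
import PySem

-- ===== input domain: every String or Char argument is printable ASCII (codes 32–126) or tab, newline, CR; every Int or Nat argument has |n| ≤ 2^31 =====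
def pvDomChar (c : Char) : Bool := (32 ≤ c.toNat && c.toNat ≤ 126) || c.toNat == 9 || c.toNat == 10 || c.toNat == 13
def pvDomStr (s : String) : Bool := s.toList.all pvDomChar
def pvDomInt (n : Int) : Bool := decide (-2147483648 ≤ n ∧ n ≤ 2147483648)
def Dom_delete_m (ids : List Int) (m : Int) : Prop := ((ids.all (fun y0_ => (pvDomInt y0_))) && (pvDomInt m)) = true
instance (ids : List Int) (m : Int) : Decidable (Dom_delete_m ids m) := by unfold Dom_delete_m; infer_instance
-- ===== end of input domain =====

-- B replaces A's per-id decrement loop over the sorted frequency list by a single pass over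
-- bucketed frequency values (objective: alternative decomposition; same exact result).

-- ===== PORT A =====
-- inner 'while deletions < m and freq[i] > 0: freq[i] -= 1; deletions += 1'
def innerA (m f deletions : Int) : Int × Int :=
  if deletions < m ∧ 0 < f then innerA m (f - 1) (deletions + 1) else (f, deletions)
termination_by f.toNat
decreasing_by omega

-- outer 'for i in range(len(freq)): if deletions >= m: break; <inner while>' over state (freq, deletions)
def loopA (m : Int) : List Int → Int → (List Int × Int)
  | [], d => ([], d)
  | f :: r, d =>
    if d ≥ m then (f :: r, d)
    else
      let p := innerA m f d
      let q := loopA m r p.2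
      (p.1 :: q.1, q.2)

def delete_m (ids : List Int) (m : Int) : Int :=
  let count := PySem.Dict.counter ids
  let freq := PySem.List.sorted count.values (fun x => x) false
  let st := loopA m freq 0
  -- sum(1 for f in freq if f > 0)
  (st.1.map (fun f => if 0 < f then (1 : Int) else 0)).sum

-- ===== PORT B =====
def delete_m_alt (ids : List Int) (m : Int) : Int :=
  let count := PySem.Dict.counter ids
  let buckets := PySem.Dict.counter count.values
  -- for v in sorted(buckets): … with 'break' as a stop flag; state (remaining, budget, stopped)
  let st := (PySem.List.sorted buckets.keys (fun x => x) false).foldl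
    (fun (st : Int × Int × Bool) v =>
      if st.2.2 then st
      else
        let g := buckets.getD v 0
        let full := min g (PySem.Int.floordiv st.2.1 v)
        (st.1 - full, st.2.1 - full * v, st.2.2 || decide (full < g)))
    ((count.size : Int), max m 0, false)
  st.1

-- ===== PRECONDITION & SPEC =====
def Spec_delete_m (ids : List Int) (m : Int) (out : Int) : Prop := out = delete_m_alt ids m
instance (ids : List Int) (m : Int) (out : Int) : Decidable (Spec_delete_m ids m out) := by unfold Spec_delete_m; infer_instance

-- ===== CLAIM (what is proved, stated in full; the proofs are below) =====
def Claim_equal_delete_m : Prop := ∀ (ids : List Int) (m : Int), Dom_delete_m ids m → Spec_delete_m ids m (delete_m ids m)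

-- ===== LEMMAS AND PROOFS =====

-- survivors s b = number of entries of s left positive after greedily spending budget b
-- left to right (a partially-affordable entry stops the spending and still counts).
def survivors : List Int → Int → Int
  | [], _ => 0
  | f :: r, b => if 0 < b ∧ f ≤ b then survivors r (b - f) else 1 + (r.length : Int)

-- B's loop body as a named function (definitionally the fold body of delete_m_alt)
def bstep (buckets : PySem.Dict Int Int) (st : Int × Int × Bool) (v : Int) : Int × Int × Bool :=
  if st.2.2 then st
  else
    let g := buckets.getD v 0
    let full := min g (PySem.Int.floordiv st.2.1 v)
    (st.1 - full, st.2.1 - full * v, st.2.2 || decide (full < g))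

lemma survivors_nonpos (s : List Int) (b : Int) (hb : b ≤ 0) : survivors s b = (s.length : Int) := by
  cases s with
  | nil => simp [survivors]
  | cons f r =>
    rw [survivors, if_neg (by omega)]
    simp only [List.length_cons]
    push_cast
    ring

lemma innerA_eq (m f d : Int) :
    0 ≤ f → d ≤ m → innerA m f d = if f ≤ m - d then (0, d + f) else (f - (m - d), m) := by
  induction f, d using innerA.induct m with
  | case1 f d h ih =>
    intro hf hd
    rw [innerA, if_pos h, ih (by omega) (by omega)]
    split_ifs <;> simp only [Prod.mk.injEq, true_and, and_true] <;> omega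
  | case2 f d h =>
    intro hf hd
    rw [innerA, if_neg h]
    split_ifs <;> simp only [Prod.mk.injEq] <;> omega

lemma loopA_spec (m : Int) : ∀ (s : List Int) (d : Int), (∀ f ∈ s, 1 ≤ f) →
    (((loopA m s d).1.countP (fun f => decide (0 < f)) : Int)) = survivors s (m - d) := by
  intro s
  induction s with
  | nil => intro d _; simp [loopA, survivors]
  | cons f r ih =>
    intro d hpos
    have hf : 1 ≤ f := hpos f (by simp)
    by_cases hd : d ≥ m
    · rw [loopA, if_pos hd, survivors_nonpos _ _ (by omega)]
      have hall : ∀ x ∈ f :: r, (fun f => decide (0 < f)) x = true := by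
        intro x hx
        have := hpos x hx
        simp
        omega
      rw [List.countP_eq_length.mpr hall]
    · rw [loopA, if_neg hd, innerA_eq m f d (by omega) (by omega)]
      by_cases hfb : f ≤ m - d
      · rw [if_pos hfb, survivors, if_pos ⟨by omega, hfb⟩]
        have hq := ih (d + f) (fun x hx => hpos x (List.mem_cons_of_mem _ hx))
        rw [show m - (d + f) = m - d - f by ring] at hq
        simpa using hq
      · rw [if_neg hfb, survivors, if_neg (by omega)]
        have hq := ih m (fun x hx => hpos x (List.mem_cons_of_mem _ hx))
        rw [show m - m = (0 : Int) by ring, survivors_nonpos r 0 le_rfl] at hq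
        simp [List.countP_cons]
        omega

lemma survivors_replicate (v : Int) (hv : 0 < v) (g : Nat) (s' : List Int) :
    ∀ b : Int, 0 ≤ b →
      survivors (List.replicate g v ++ s') b =
        if (g : Int) ≤ b / v then survivors s' (b - (g : Int) * v)
        else (g : Int) + (s'.length : Int) - b / v := by
  induction g with
  | zero =>
    intro b hb
    rw [if_pos (by exact_mod_cast Int.ediv_nonneg hb hv.le)]
    simp
  | succ g ih =>
    intro b hb
    rw [List.replicate_succ, List.cons_append, survivors]
    by_cases hvb : v ≤ b
    · rw [if_pos ⟨by omega, hvb⟩, ih (b - v) (by omega)]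
      have hdiv : (b - v) / v = b / v - 1 := by
        have h := Int.add_mul_ediv_right b (-1) (show v ≠ 0 by omega)
        have h2 : b + -1 * v = b - v := by ring
        rw [h2] at h
        omega
      rw [hdiv]
      by_cases hc : ((g : Int) + 1) ≤ b / v
      · rw [if_pos (by omega), if_pos (by push_cast; omega)]
        congr 1
        push_cast
        ring
      · rw [if_neg (by omega), if_neg (by push_cast; omega)]
        push_cast
        omega
    · rw [if_neg (by omega)]
      have hdiv0 : b / v = 0 := Int.ediv_eq_zero_of_lt hb (by omega)
      rw [if_neg (by rw [hdiv0]; push_cast; omega), hdiv0]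
      simp only [List.length_append, List.length_replicate]
      push_cast
      ring

-- the fold of B skips everything once the stop flag is set
lemma bfold_skip (buckets : PySem.Dict Int Int) (d : List Int) (R b : Int) :
    List.foldl (bstep buckets) (R, b, true) d = (R, b, true) := by
  induction d with
  | nil => rfl
  | cons v d' ih => simpa [bstep] using ih

-- B's fold over distinct values with multiplicities c computes survivors of the flattened list
lemma bfold_eq (buckets : PySem.Dict Int Int) (c : Int → Nat)
    (hc : ∀ v, buckets.getD v 0 = (c v : Int)) :
    ∀ (d : List Int) (R b : Int), 0 ≤ b → (∀ v ∈ d, 0 < v) →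
      (List.foldl (bstep buckets) (R, b, false) d).1
      = R - (((d.flatMap (fun v => List.replicate (c v) v)).length : Int)
              - survivors (d.flatMap (fun v => List.replicate (c v) v)) b) := by
  intro d
  induction d with
  | nil => intro R b hb _; simp [survivors]
  | cons v d' ih =>
    intro R b hb hv
    have hv0 : 0 < v := hv v (by simp)
    have hfd : PySem.Int.floordiv b v = b / v := PySem.Int.floordiv_eq_ediv_of_pos hv0
    have hstep : bstep buckets (R, b, false) v
        = (R - min ((c v : Int)) (b / v), b - min ((c v : Int)) (b / v) * v,
           decide (min ((c v : Int)) (b / v) < (c v : Int))) := by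
      simp [bstep, hc, hfd]
    rw [List.foldl_cons, hstep]
    rw [show (v :: d').flatMap (fun v => List.replicate (c v) v)
          = List.replicate (c v) v ++ d'.flatMap (fun v => List.replicate (c v) v) from rfl]
    rcases le_or_gt ((c v : Int)) (b / v) with hle | hlt
    · rw [min_eq_left hle]
      have hflag : decide ((c v : Int) < (c v : Int)) = false := by simp
      rw [hflag]
      have hmul : (c v : Int) * v ≤ b := by
        have h := (Int.le_ediv_iff_mul_le hv0).mp hle
        linarith
      rw [ih (R - (c v : Int)) (b - (c v : Int) * v) (by omega) (fun w hw => hv w (by simp [hw]))]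
      rw [survivors_replicate v hv0 (c v) _ b hb, if_pos hle]
      rw [List.length_append, List.length_replicate]
      push_cast
      ring
    · rw [min_eq_right hlt.le]
      have hflag : decide (b / v < (c v : Int)) = true := by simp [hlt]
      rw [hflag, bfold_skip]
      rw [survivors_replicate v hv0 (c v) _ b hb, if_neg (by omega)]
      rw [List.length_append, List.length_replicate]
      show R - b / v = _
      push_cast
      ring

-- counting inside a flatMap of replicates over distinct keys
lemma count_flatMap_replicate (c : Int → Nat) :
    ∀ (d : List Int), d.Nodup → ∀ x : Int,
      List.count x (d.flatMap (fun v => List.replicate (c v) v)) = if x ∈ d then c x else 0 := by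
  intro d
  induction d with
  | nil => intro _ x; simp
  | cons v d' ih =>
    intro hnd x
    rw [List.flatMap_cons, List.count_append, List.count_replicate, ih hnd.of_cons x]
    by_cases hxv : x = v
    · subst hxv
      simp [(List.nodup_cons.mp hnd).1]
    · simp [hxv, (Ne.symm hxv : v ≠ x)]

lemma pairwise_flatMap_replicate (c : Int → Nat) :
    ∀ (d : List Int), d.Pairwise (· ≤ ·) →
      (d.flatMap (fun v => List.replicate (c v) v)).Pairwise (· ≤ ·) := by
  intro d
  induction d with
  | nil => intro _; simp
  | cons v d' ih =>
    intro hp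
    rw [List.flatMap_cons, List.pairwise_append]
    refine ⟨List.pairwise_replicate.mpr (Or.inr le_rfl), ih hp.of_cons, ?_⟩
    intro a ha b hb
    obtain ⟨w, hw, hbw⟩ := List.mem_flatMap.mp hb
    rw [List.eq_of_mem_replicate ha, List.eq_of_mem_replicate hbw]
    exact (List.pairwise_cons.mp hp).1 w hw

-- the sorted value list equals the flattening of sorted distinct values with their counts
lemma sorted_eq_flatMap (l : List Int) :
    PySem.List.sorted l (fun x => x) false
      = (PySem.List.sorted (PySem.Set.ofList l) (fun x => x) false).flatMap
          (fun v => List.replicate (List.count v l) v) := by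
  set d := PySem.List.sorted (PySem.Set.ofList l) (fun x => x) false with hd
  have hdperm : d.Perm (PySem.Set.ofList l) := PySem.List.sorted_perm _ _ _
  have hdnd : d.Nodup := hdperm.nodup_iff.mpr (PySem.Set.nodup_ofList l)
  have hmemd : ∀ x : Int, x ∈ d ↔ x ∈ l := by
    intro x
    rw [hdperm.mem_iff, PySem.Set.mem_ofList]
  apply List.Perm.eq_of_pairwise (fun a b _ _ hab hba => le_antisymm hab hba)
  · exact PySem.List.sorted_pairwise l (fun x => x)
  · exact pairwise_flatMap_replicate _ d (PySem.List.sorted_pairwise _ _)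
  · rw [List.perm_iff_count]
    intro x
    rw [(PySem.List.sorted_perm l (fun x => x) false).count_eq,
        count_flatMap_replicate _ d hdnd x]
    by_cases hx : x ∈ l
    · rw [if_pos ((hmemd x).mpr hx)]
    · rw [if_neg (fun h => hx ((hmemd x).mp h)), List.count_eq_zero.mpr hx]

-- every value of Counter(ids) is a positive count
lemma counter_values_pos (ids : List Int) :
    ∀ f ∈ (PySem.Dict.counter ids).values, 1 ≤ f := by
  intro f hf
  rw [PySem.Dict.values_eq_map_keys _ (PySem.Dict.nodup_keys_counter ids) 0] at hf
  obtain ⟨k, hk, hfk⟩ := List.mem_map.mp hf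
  rw [PySem.Dict.getD_counter] at hfk
  rw [PySem.Dict.keys_counter, PySem.Set.mem_ofList] at hk
  have : 0 < List.count k ids := List.count_pos_iff.mpr hk
  omega

lemma survivors_max (s : List Int) (m : Int) : survivors s m = survivors s (max m 0) := by
  by_cases hm : 0 ≤ m
  · rw [max_eq_left hm]
  · rw [max_eq_right (by omega), survivors_nonpos _ _ (by omega),
        survivors_nonpos _ _ le_rfl]

-- ===== VERDICT (by name: the statement is the Claim_ definition above) =====
theorem delete_m_spec : Claim_equal_delete_m := by
  intro ids m _
  unfold Spec_delete_m
  set count := PySem.Dict.counter ids with hcount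
  set l := count.values with hl
  set s := PySem.List.sorted l (fun x => x) false with hs
  have hpos : ∀ f ∈ l, 1 ≤ f := counter_values_pos ids
  have hspos : ∀ f ∈ s, 1 ≤ f := fun f hf =>
    hpos f ((PySem.List.sorted_perm l (fun x => x) false).mem_iff.mp hf)
  -- A's side
  have hA : delete_m ids m = survivors s m := by
    show (( (loopA m s 0).1.map (fun f => if 0 < f then (1 : Int) else 0)).sum) = survivors s m
    have hmap : (fun f : Int => if 0 < f then (1 : Int) else 0)
        = (fun f : Int => if (fun f => decide (0 < f)) f = true then (1 : Int) else 0) := by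
      funext f; simp
    rw [hmap, PySem.List.sum_map_ite_one_zero]
    have := loopA_spec m s 0 hspos
    rw [sub_zero] at this
    exact this
  -- B's side
  have hB : delete_m_alt ids m = survivors s (max m 0) := by
    show (List.foldl (bstep (PySem.Dict.counter l))
        ((count.size : Int), max m 0, false)
        (PySem.List.sorted (PySem.Dict.counter l).keys (fun x => x) false)).1
      = survivors s (max m 0)
    set dk := PySem.List.sorted (PySem.Dict.counter l).keys (fun x => x) false with hdk
    have hdkeys : (PySem.Dict.counter l).keys = PySem.Set.ofList l :=
      PySem.Dict.keys_counter l
    have hvpos : ∀ v ∈ dk, 0 < v := by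
      intro v hv
      have : v ∈ (PySem.Dict.counter l).keys :=
        (PySem.List.sorted_perm _ _ _).mem_iff.mp hv
      rw [hdkeys, PySem.Set.mem_ofList] at this
      have := hpos v this
      omega
    rw [bfold_eq (PySem.Dict.counter l) (fun v => List.count v l)
          (fun v => PySem.Dict.getD_counter l v) dk (count.size : Int) (max m 0)
          (by omega) hvpos]
    have hflat : dk.flatMap (fun v => List.replicate (List.count v l) v) = s := by
      rw [hs, sorted_eq_flatMap l, hdk, hdkeys]
    rw [hflat]
    have hsize : (count.size : Int) = (s.length : Int) := by
      have h1 : s.length = l.length := (PySem.List.sorted_perm l (fun x => x) false).length_eq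
      have h2 : l.length = count.size := by
        simp [hl, PySem.Dict.values, PySem.Dict.size]
      omega
    rw [hsize]
    ring
  rw [hA, hB, survivors_max]
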